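-- pv_equiv track=rewrite | github.com/Attyuttam/cp-practice | flipping_game_kadane.py | solution
-- ===== SOURCE A (Python) =====
-- def solution(n, arr):
--     total_ones = sum(arr)
--     max_diff = current_diff = 0
--
--     for num in arr:
--         val = 1 if num == 0 else -1
--         current_diff = max(val, current_diff + val)
--         max_diff = max(max_diff, current_diff)
--
--     # Handle the case when all elements are 1
--     if max_diff == 0:
--         return n - 1
--
--     return total_ones + max_diff
-- ===== SOURCE B (Python) =====
-- def solution(n, arr):
--     if 0 not in arr:
--         return n - 1
--     best = None
--     suffix = arr
--     while suffix:
--         gain = 0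
--         for x in suffix:
--             gain += 1 if x == 0 else -1
--             if best is None or gain > best:
--                 best = gain
--         suffix = suffix[1:]
--     return sum(arr) + best
-- ===== Notes on version B (the rewrite author's own statement) =====
-- stated objective: alternative
-- what changed: Replaces Kadane's single-pass running-maximum recurrence with an explicit scan of every suffix's prefix gains (all nonempty subarrays) plus a direct '0 not in arr' membership guard for the all-ones/empty case.
import Mathlib
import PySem

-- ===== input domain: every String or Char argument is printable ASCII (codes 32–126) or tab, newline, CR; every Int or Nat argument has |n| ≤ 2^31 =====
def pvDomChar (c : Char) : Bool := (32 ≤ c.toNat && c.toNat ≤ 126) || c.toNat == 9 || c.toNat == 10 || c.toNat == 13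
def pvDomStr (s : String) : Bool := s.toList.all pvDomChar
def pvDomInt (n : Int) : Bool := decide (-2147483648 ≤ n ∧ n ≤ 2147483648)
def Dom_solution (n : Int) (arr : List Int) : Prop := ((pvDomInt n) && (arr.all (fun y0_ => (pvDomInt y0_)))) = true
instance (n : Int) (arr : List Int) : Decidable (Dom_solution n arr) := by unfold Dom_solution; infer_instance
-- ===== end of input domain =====

-- B replaces Kadane's single-pass running maximum with an explicit scan over every
-- suffix's prefix gains (all nonempty subarrays) plus a direct `0 not in arr` guard;
-- alternative decomposition, no speed claim.

-- ===== PORT A =====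
-- one loop iteration of A: state (max_diff, current_diff)
def solStep (st : Int × Int) (num : Int) : Int × Int :=
  let v : Int := if num = 0 then 1 else -1
  let c := max v (st.2 + v)
  (max st.1 c, c)

def solution (n : Int) (arr : List Int) : Int :=
  let total := arr.sum
  let st := arr.foldl solStep (0, 0)
  if st.1 = 0 then n - 1 else total + st.1

-- ===== PORT B =====
-- inner `for x in suffix` loop: running gain, best-so-far (None until first update)
def bInner : List Int → Int → Option Int → Option Int
  | [], _, best => best
  | x :: rest, gain, best =>
    let g := gain + (if x = 0 then 1 else -1)
    let b : Option Int :=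
      match best with
      | none => some g
      | some b0 => if g > b0 then some g else some b0
    bInner rest g b

-- outer `while suffix:` loop over successive suffixes
def bOuter : List Int → Option Int → Option Int
  | [], best => best
  | x :: rest, best => bOuter rest (bInner (x :: rest) 0 best)

def solution_alt (n : Int) (arr : List Int) : Int :=
  if arr.contains 0 = false then n - 1
  -- getD 0 is unreachable: arr contains 0, so arr ≠ [] and best was set
  else arr.sum + (bOuter arr none).getD 0

-- ===== PRECONDITION & SPEC =====
def Spec_solution (n : Int) (arr : List Int) (out : Int) : Prop := out = solution_alt n arr
instance (n : Int) (arr : List Int) (out : Int) : Decidable (Spec_solution n arr out) := by unfold Spec_solution; infer_instance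

-- ===== CLAIM (what is proved, stated in full; the proofs are below) =====
def Claim_equal_solution : Prop := ∀ (n : Int) (arr : List Int), Dom_solution n arr → Spec_solution n arr (solution n arr)

-- ===== LEMMAS AND PROOFS =====

-- the flip value of one element
def pval (x : Int) : Int := if x = 0 then 1 else -1

-- max, over nonempty prefixes p of l, of the sum of flip values of p
def pm : List Int → Int
  | [] => 0
  | x :: l => pval x + max 0 (pm l)

-- max, over nonempty contiguous subarrays of l, of the sum of flip values
def M : List Int → Int
  | [] => 0
  | [x] => pm [x]
  | x :: y :: l => max (pm (x :: y :: l)) (M (y :: l))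

-- fold an optional best with a new candidate
def omax : Option Int → Int → Int
  | none, a => a
  | some b, a => max b a

theorem obest_eq (g : Int) (best : Option Int) :
    (match best with
      | none => some g
      | some b0 => if g > b0 then some g else some b0) = some (omax best g) := by
  cases best with
  | none => rfl
  | some b0 =>
    simp only [omax, max_def]
    split_ifs <;> first | rfl | (congr 1; omega)

theorem bInner_cons (x : Int) (rest : List Int) (gain : Int) (best : Option Int) :
    bInner (x :: rest) gain best
      = bInner rest (gain + pval x) (some (omax best (gain + pval x))) := by
  rw [show bInner (x :: rest) gain best
        = bInner rest (gain + pval x)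
            (match best with
              | none => some (gain + pval x)
              | some b0 => if gain + pval x > b0 then some (gain + pval x) else some b0) from rfl]
  rw [obest_eq]

theorem pm_cons (x y : Int) (r : List Int) :
    pm (x :: y :: r) = pval x + max 0 (pm (y :: r)) := rfl

theorem M_cons (x y : Int) (r : List Int) :
    M (x :: y :: r) = max (pm (x :: y :: r)) (M (y :: r)) := rfl

theorem bInner_eq (l : List Int) : ∀ (gain : Int) (best : Option Int), l ≠ [] →
    bInner l gain best = some (omax best (gain + pm l)) := by
  induction l with
  | nil => intro _ _ h; exact absurd rfl h
  | cons x rest ih =>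
    intro gain best _
    rw [bInner_cons]
    cases rest with
    | nil => cases best <;> simp [bInner, pm, omax]
    | cons y r =>
      rw [ih _ _ (by simp), pm_cons]
      cases best <;> simp only [omax, Option.some.injEq] <;>
        generalize pval x = v <;> generalize pm (y :: r) = P <;>
        simp only [max_def] <;> split_ifs <;> omega

theorem bOuter_eq (l : List Int) : ∀ (best : Option Int), l ≠ [] →
    bOuter l best = some (omax best (M l)) := by
  induction l with
  | nil => intro _ h; exact absurd rfl h
  | cons x rest ih =>
    intro best _
    rw [show bOuter (x :: rest) best = bOuter rest (bInner (x :: rest) 0 best) from rfl]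
    rw [bInner_eq _ _ _ (by simp)]
    cases rest with
    | nil =>
      show some (omax best (0 + pm [x])) = some (omax best (M [x]))
      simp [M]
    | cons y r =>
      rw [ih _ (by simp), M_cons]
      cases best <;> simp only [omax, Option.some.injEq] <;>
        generalize pm (x :: y :: r) = P <;> generalize M (y :: r) = Q <;>
        simp only [max_def] <;> split_ifs <;> omega

-- Kadane's best-ending value over each nonempty prefix, folded with max; none for []
def kfold : List Int → Int → Option Int
  | [], _ => none
  | x :: l, cur =>
    let c := pval x + max 0 cur
    some (match kfold l c with | none => c | some m => max c m)

theorem kfold_cons (x : Int) (l : List Int) (cur : Int) :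
    kfold (x :: l) cur
      = some (match kfold l (pval x + max 0 cur) with
          | none => pval x + max 0 cur
          | some m => max (pval x + max 0 cur) m) := rfl

theorem foldA_fst (l : List Int) : ∀ (md cur : Int),
    (l.foldl solStep (md, cur)).1 = omax (kfold l cur) md := by
  induction l with
  | nil => intro md cur; simp [kfold, omax]
  | cons x rest ih =>
    intro md cur
    have hc : max (if x = 0 then (1:Int) else -1) (cur + (if x = 0 then 1 else -1))
        = pval x + max 0 cur := by unfold pval; split <;> omega
    rw [show (x :: rest).foldl solStep (md, cur)
          = rest.foldl solStep (max md (max (if x = 0 then (1:Int) else -1) (cur + (if x = 0 then 1 else -1))),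
              max (if x = 0 then (1:Int) else -1) (cur + (if x = 0 then 1 else -1))) from rfl]
    rw [hc, ih, kfold_cons]
    clear hc ih
    cases h : kfold rest (pval x + max 0 cur) <;> simp only [omax] <;> clear h <;>
      generalize pval x = v <;> simp only [max_def] <;> split_ifs <;> first | omega | linarith

theorem pm_le_M (l : List Int) (h : l ≠ []) : pm l ≤ M l := by
  match l with
  | [x] => simp [M]
  | x :: y :: r => rw [M_cons]; exact le_max_left _ _

theorem kfold_eq (l : List Int) : ∀ (cur : Int), l ≠ [] →
    kfold l cur = some (max (max 0 cur + pm l) (M l)) := by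
  induction l with
  | nil => intro _ h; exact absurd rfl h
  | cons x rest ih =>
    intro cur _
    rw [kfold_cons]
    cases rest with
    | nil =>
      show some (pval x + max 0 cur) = _
      simp only [M, pm, Option.some.injEq]
      generalize pval x = v
      simp only [max_def]
      split_ifs <;> omega
    | cons y r =>
      have hpm := pm_le_M (y :: r) (by simp)
      rw [ih _ (by simp)]
      simp only [M_cons, pm_cons, Option.some.injEq]
      generalize pval x = v
      revert hpm
      generalize pm (y :: r) = P
      generalize M (y :: r) = Q
      intro hpm
      simp only [max_def]
      split_ifs <;> first | omega | linarith

theorem M_no_zero (l : List Int) (h : l ≠ []) (hz : ∀ x ∈ l, x ≠ 0) : pm l = -1 ∧ M l = -1 := by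
  induction l with
  | nil => exact absurd rfl h
  | cons x rest ih =>
    have hx : pval x = -1 := by unfold pval; simp [hz x (by simp)]
    cases rest with
    | nil => simp [pm, M, hx]
    | cons y r =>
      have ⟨h1, h2⟩ := ih (by simp) (fun z hz' => hz z (by simp [hz']))
      rw [M_cons, pm_cons, hx, h1, h2]
      exact ⟨by decide, by decide⟩

theorem M_zero_mem (l : List Int) (hz : (0:Int) ∈ l) : 1 ≤ M l := by
  induction l with
  | nil => simp at hz
  | cons x rest ih =>
    have hpm : x = 0 → 1 ≤ pm (x :: rest) := by
      intro hx
      have hv : pval x = 1 := by unfold pval; simp [hx]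
      cases rest with
      | nil => simp [pm, hv]
      | cons y r =>
        rw [pm_cons, hv]
        have : (0:Int) ≤ max 0 (pm (y :: r)) := le_max_left _ _
        omega
    cases rest with
    | nil =>
      have hx : x = 0 := (List.mem_singleton.mp hz).symm
      have := hpm hx
      simpa [M] using this
    | cons y r =>
      rcases List.mem_cons.mp hz with hx | hmem
      · calc (1:Int) ≤ pm (x :: y :: r) := hpm hx.symm
          _ ≤ M (x :: y :: r) := pm_le_M _ (by simp)
      · exact le_trans (ih hmem) (by rw [M_cons]; exact le_max_right _ _)

theorem solution_eq (n : Int) (arr : List Int) : solution n arr = solution_alt n arr := by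
  cases arr with
  | nil => simp [solution, solution_alt]
  | cons a l =>
    have hmd : ((a :: l).foldl solStep (0, 0)).1 = max (M (a :: l)) 0 := by
      rw [foldA_fst, kfold_eq _ _ (by simp)]
      have hpm := pm_le_M (a :: l) (by simp)
      revert hpm
      simp only [omax]
      generalize pm (a :: l) = P
      generalize M (a :: l) = Q
      intro hpm
      simp only [max_def]
      split_ifs <;> omega
    by_cases hz : (0:Int) ∈ a :: l
    · have hM := M_zero_mem _ hz
      have hmax : max (M (a :: l)) 0 = M (a :: l) := max_eq_left (by omega)
      have hcon : (a :: l).contains 0 = true := List.contains_iff_mem.mpr hz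
      simp only [solution, solution_alt, hcon]
      rw [hmd, hmax, bOuter_eq _ _ (by simp)]
      simp only [omax, Option.getD_some, Bool.true_eq_false, if_false]
      rw [if_neg (by omega)]
    · have hM : M (a :: l) = -1 :=
        (M_no_zero (a :: l) (by simp) (fun x hx hx0 => hz (hx0 ▸ hx))).2
      have hcon : (a :: l).contains 0 = false := by
        simpa [List.contains_iff_mem] using hz
      simp only [solution, solution_alt, hcon]
      rw [hmd, hM]
      norm_num

-- ===== VERDICT (by name: the statement is the Claim_ definition above) =====
theorem solution_spec : Claim_equal_solution := by
  intro n arr _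
  exact solution_eq n arr
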